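-- pv_equiv track=rewrite | github.com/LIFA-0808/course_algoritm_Py | Lesson_5/les_5_task_2.py | h_addition
-- ===== SOURCE A (Python) =====
-- from collections import deque
--
-- def h_addition(num_1, num_2):
--     deq_1 = deque(num_1)
--     deq_2 = deque(num_2)
--     len_1 = len(num_1)
--     len_2 = len(num_2)
--     max_len = max(len_1, len_2)
--     # Приведение к одинаковому числу элементов
--     if len_1 > len_2:
--         deq_2.extendleft([0]*(len_1 - len_2 + 1))
--         deq_1.appendleft(0)
--     elif len_2 > len_1:
--         deq_1.extendleft([0]*(len_2 - len_1 + 1))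
--         deq_2.appendleft(0)
--     # Сложение
--     temp_list = []
--     for i in range(max_len):
--         temp_list.append(deq_1.pop() + deq_2.pop())
--     return temp_list
-- ===== SOURCE B (Python) =====
-- def h_addition(num_1, num_2):
--     m = max(len(num_1), len(num_2))
--     r1 = num_1[::-1] + [0] * (m - len(num_1))
--     r2 = num_2[::-1] + [0] * (m - len(num_2))
--     return [x + y for x, y in zip(r1, r2)]
-- ===== Notes on version B (the rewrite author's own statement) =====
-- stated objective: simpler
-- what changed: Replaced the deque padding-and-pop loop by reversing both lists, right-padding them with zeros to the common length, and combining them with a single zip comprehension.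
import Mathlib
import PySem

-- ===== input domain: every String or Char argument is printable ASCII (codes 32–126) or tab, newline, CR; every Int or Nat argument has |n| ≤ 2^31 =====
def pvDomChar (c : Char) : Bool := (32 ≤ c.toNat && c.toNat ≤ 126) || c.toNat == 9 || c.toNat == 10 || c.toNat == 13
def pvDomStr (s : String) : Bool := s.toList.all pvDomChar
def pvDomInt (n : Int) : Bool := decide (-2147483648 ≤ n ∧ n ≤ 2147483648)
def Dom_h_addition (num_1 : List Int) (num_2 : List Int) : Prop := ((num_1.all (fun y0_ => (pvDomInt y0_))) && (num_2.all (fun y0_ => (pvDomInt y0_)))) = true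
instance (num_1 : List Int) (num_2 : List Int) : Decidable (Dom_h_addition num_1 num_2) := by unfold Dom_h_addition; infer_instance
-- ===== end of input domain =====

-- B replaces A's deque padding-and-pop loop by zero-padded reversed lists combined with one zip (simpler decomposition, same cost).


-- ===== PORT A =====
-- the 'for i in range(max_len)' loop: each step pops the last element of both deques
-- (getLast?.getD 0 totalizes pop; the deques are never empty when popped on any input, so the default is never used)
def hAddLoop : List Int → List Int → List Int → Nat → List Int
  | _, _, temp, 0 => temp
  | d1, d2, temp, n + 1 =>
      hAddLoop d1.dropLast d2.dropLast
        (temp ++ [d1.getLast?.getD 0 + d2.getLast?.getD 0]) n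

def h_addition (num_1 : List Int) (num_2 : List Int) : List Int :=
  let len_1 := num_1.length
  let len_2 := num_2.length
  let max_len := max len_1 len_2
  -- deque padding: extendleft of zeros prepends them; appendleft prepends one zero
  let p :=
    if len_1 > len_2 then
      (0 :: num_1, List.replicate (len_1 - len_2 + 1) 0 ++ num_2)
    else if len_2 > len_1 then
      (List.replicate (len_2 - len_1 + 1) 0 ++ num_1, 0 :: num_2)
    else (num_1, num_2)
  hAddLoop p.1 p.2 [] max_len

-- ===== PORT B =====
def h_addition_alt (num_1 : List Int) (num_2 : List Int) : List Int :=
  let m := max num_1.length num_2.length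
  let r1 := num_1.reverse ++ List.replicate (m - num_1.length) 0
  let r2 := num_2.reverse ++ List.replicate (m - num_2.length) 0
  List.zipWith (· + ·) r1 r2

-- ===== PRECONDITION & SPEC =====
def Spec_h_addition (num_1 : List Int) (num_2 : List Int) (out : List Int) : Prop := out = h_addition_alt num_1 num_2
instance (num_1 : List Int) (num_2 : List Int) (out : List Int) : Decidable (Spec_h_addition num_1 num_2 out) := by unfold Spec_h_addition; infer_instance

-- ===== CLAIM (what is proved, stated in full; the proofs are below) =====
def Claim_equal_h_addition : Prop := ∀ (num_1 : List Int) (num_2 : List Int), Dom_h_addition num_1 num_2 → Spec_h_addition num_1 num_2 (h_addition num_1 num_2)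

-- ===== LEMMAS AND PROOFS =====

lemma hAddLoop_eq (n : Nat) : ∀ (a b temp : List Int), n ≤ a.length → n ≤ b.length →
    hAddLoop a b temp n = temp ++ (List.zipWith (· + ·) a.reverse b.reverse).take n := by
  induction n with
  | zero => intro a b temp _ _; simp [hAddLoop]
  | succ n ih =>
    intro a b temp ha hb
    obtain ⟨x, ra, hx⟩ : ∃ x ra, a.reverse = x :: ra := by
      cases h : a.reverse with
      | nil => rw [List.reverse_eq_nil_iff] at h; subst h; simp at ha
      | cons x ra => exact ⟨x, ra, rfl⟩
    obtain ⟨y, rb, hy⟩ : ∃ y rb, b.reverse = y :: rb := by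
      cases h : b.reverse with
      | nil => rw [List.reverse_eq_nil_iff] at h; subst h; simp at hb
      | cons y rb => exact ⟨y, rb, rfl⟩
    have ha' : a = ra.reverse ++ [x] := by
      have := congrArg List.reverse hx; simpa using this
    have hb' : b = rb.reverse ++ [y] := by
      have := congrArg List.reverse hy; simpa using this
    have hal : ra.length = a.length - 1 := by
      have := congrArg List.length hx; simp at this; omega
    have hbl : rb.length = b.length - 1 := by
      have := congrArg List.length hy; simp at this; omega
    rw [hAddLoop, ha', hb']
    simp only [List.dropLast_concat, List.getLast?_concat, Option.getD_some]
    rw [ih ra.reverse rb.reverse _ (by simp; omega) (by simp; omega)]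
    simp [List.take_succ_cons]

lemma zip_pad (u v : List Int) (k : Nat) (hlen : u.length = v.length + k) :
    (List.zipWith (· + ·) (u ++ [0]) ((v ++ List.replicate k 0) ++ [(0:Int)])).take u.length
      = List.zipWith (· + ·) u (v ++ List.replicate k 0) := by
  rw [List.zipWith_append (show u.length = (v ++ List.replicate k 0).length by simp; omega)]
  rw [List.take_left' (by simp; omega)]

theorem h_addition_spec' (num_1 num_2 : List Int) :
    h_addition num_1 num_2 = h_addition_alt num_1 num_2 := by
  unfold h_addition h_addition_alt
  dsimp only
  rcases Nat.lt_trichotomy num_1.length num_2.length with h | h | h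
  · -- len_2 > len_1
    rw [if_neg (by omega), if_pos h]
    rw [hAddLoop_eq _ _ _ _ (by simp; omega) (by simp; omega)]
    have hmax : max num_1.length num_2.length = num_2.length := by omega
    rw [hmax]
    have hrep : List.replicate (num_2.length - num_1.length + 1) (0:Int)
        = List.replicate (num_2.length - num_1.length) 0 ++ [0] := by
      rw [List.replicate_succ']
    simp only [List.reverse_append, List.reverse_cons, List.reverse_replicate, hrep,
      List.reverse_nil, List.nil_append]
    have := zip_pad num_2.reverse num_1.reverse (num_2.length - num_1.length) (by simp; omega)
    rw [show (num_1.reverse ++ List.replicate (num_2.length - num_1.length) (0:Int)) ++ [(0:Int)]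
          = num_1.reverse ++ (List.replicate (num_2.length - num_1.length) (0:Int) ++ [0]) by
        simp] at *
    -- align: LHS zip has order (padded num_1 with extra 0, num_2 ++ [0]); use commuted pad lemma
    have hcomm : ∀ (p q : List Int), List.zipWith (· + ·) p q = List.zipWith (· + ·) q p := by
      intro p q
      induction p generalizing q with
      | nil => cases q <;> simp
      | cons a p ihp => cases q with
        | nil => simp
        | cons b q => simp [ihp, Int.add_comm]
    rw [hcomm, show ([(0:Int)] ++ List.replicate (num_2.length - num_1.length) (0:Int))
          = List.replicate (num_2.length - num_1.length) (0:Int) ++ [0] from by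
        rw [List.singleton_append, ← List.replicate_succ, List.replicate_succ']]
    simpa [List.length_reverse] using this.trans (hcomm _ _)
  · -- equal lengths
    rw [if_neg (by omega), if_neg (by omega)]
    rw [hAddLoop_eq _ _ _ _ (by simp; omega) (by simp; omega)]
    have hmax : max num_1.length num_2.length = num_1.length := by omega
    rw [hmax]
    simp [h, List.take_of_length_le, List.length_zipWith]
  · -- len_1 > len_2
    rw [if_pos h]
    rw [hAddLoop_eq _ _ _ _ (by simp; omega) (by simp; omega)]
    have hmax : max num_1.length num_2.length = num_1.length := by omega
    rw [hmax]
    have hrep : List.replicate (num_1.length - num_2.length + 1) (0:Int)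
        = List.replicate (num_1.length - num_2.length) 0 ++ [0] := by
      rw [List.replicate_succ']
    simp only [List.reverse_append, List.reverse_cons, List.reverse_replicate, hrep,
      List.reverse_nil, List.nil_append]
    have := zip_pad num_1.reverse num_2.reverse (num_1.length - num_2.length) (by simp; omega)
    rw [show (num_2.reverse ++ List.replicate (num_1.length - num_2.length) (0:Int)) ++ [(0:Int)]
          = num_2.reverse ++ (List.replicate (num_1.length - num_2.length) (0:Int) ++ [0]) by
        simp] at *
    rw [show ([(0:Int)] ++ List.replicate (num_1.length - num_2.length) (0:Int))
          = List.replicate (num_1.length - num_2.length) (0:Int) ++ [0] from by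
        rw [List.singleton_append, ← List.replicate_succ, List.replicate_succ']]
    simpa [List.length_reverse] using this

-- ===== VERDICT (by name: the statement is the Claim_ definition above) =====
theorem h_addition_spec : Claim_equal_h_addition := by
  intro num_1 num_2 _
  exact h_addition_spec' num_1 num_2
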